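-- pv_equiv track=rewrite | github.com/lfortran/lfortran | generate_reference_doc.py | unescape_cpp_string
-- ===== SOURCE A (Python) =====
-- def unescape_cpp_string(text):
--     """
--     Unescape C++ string escape sequences.
--     Converts \" to ", \n to newline, \\ to backslash, etc.
--     """
--     result = []
--     i = 0
--     while i < len(text):
--         if text[i] == '\\' and i + 1 < len(text):
--             next_char = text[i + 1]
--             if next_char == '"':
--                 result.append('"')
--             elif next_char == 'n':
--                 result.append('\n')
--             elif next_char == 't':
--                 result.append('\t')
--             elif next_char == '\\':
--                 result.append('\\')
--             else:
--                 result.append(next_char)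
--             i += 2
--         else:
--             result.append(text[i])
--             i += 1
--     return ''.join(result)
-- ===== SOURCE B (Python) =====
-- _MAP = {'n': '\n', 't': '\t'}
--
-- def unescape_cpp_string(text):
--     """
--     Unescape C++ string escape sequences.
--     Converts \" to ", \n to newline, \\ to backslash, etc.
--     """
--     parts = text.split('\\')
--     out = [parts[0]]
--     it = iter(parts[1:])
--     for p in it:
--         if p:
--             # p follows a backslash: its first char is the escaped char
--             out.append(_MAP.get(p[0], p[0]) + p[1:])
--         else:
--             # empty part: two consecutive backslashes (or a trailing one)
--             nxt = next(it, None)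
--             if nxt is None:
--                 out.append('\\')
--             else:
--                 out.append('\\' + nxt)
--     return ''.join(out)
-- ===== Notes on version B (the rewrite author's own statement) =====
-- stated objective: alternative
-- what changed: Replaces A's single-pass indexed scanner with two-character lookahead by a staged split-and-reassemble: the string is split at every backslash, then each part after the first is emitted with its first character mapped through an escape table (an empty part being an escaped backslash, which consumes the following part verbatim).
import Mathlib
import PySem

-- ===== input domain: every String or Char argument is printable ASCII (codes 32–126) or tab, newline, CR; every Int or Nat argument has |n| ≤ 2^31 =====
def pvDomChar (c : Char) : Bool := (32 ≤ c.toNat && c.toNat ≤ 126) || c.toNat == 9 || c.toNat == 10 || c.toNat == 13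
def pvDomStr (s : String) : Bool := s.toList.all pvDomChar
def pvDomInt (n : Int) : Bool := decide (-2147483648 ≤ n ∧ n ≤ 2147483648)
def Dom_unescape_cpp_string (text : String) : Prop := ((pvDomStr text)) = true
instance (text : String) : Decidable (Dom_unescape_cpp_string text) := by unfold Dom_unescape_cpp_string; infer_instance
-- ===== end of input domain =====

-- B replaces A's indexed two-character-lookahead scan by a staged strategy: split the
-- string on '\\' and reassemble the parts, mapping each part's first character (idiomatic).


-- ===== PORT A =====
-- A's while loop over indices i, i+1 (i += 2 after an escape) becomes structural
-- recursion consuming one or two characters per step; the 'i + 1 < len' guard is the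
-- two-element pattern, the branch order of the if/elif chain is kept.
def unescape_cpp_string_go : List Char → List Char
  | [] => []
  | '\\' :: next_char :: rest =>
      (if next_char = '"' then '"'
       else if next_char = 'n' then '\n'
       else if next_char = 't' then '\t'
       else if next_char = '\\' then '\\'
       else next_char) :: unescape_cpp_string_go rest
  | c :: rest => c :: unescape_cpp_string_go rest

def unescape_cpp_string (text : String) : String :=
  String.mk (unescape_cpp_string_go text.toList)

-- ===== PORT B =====
def unescape_cpp_string_MAP : PySem.Dict Char Char :=
  PySem.Dict.ofList [('n', '\n'), ('t', '\t')]

-- Source B's text.split('\\'), hand-ported (exact: Python's str.split with a 1-char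
-- separator cuts at every separator occurrence, keeping empty pieces); the result
-- ('parts' of Source B, always nonempty) is returned pre-split as (parts[0], parts[1:]).
def unescape_cpp_string_split : List Char → List Char × List (List Char)
  | [] => ([], [])
  | '\\' :: r =>
      let (p, ps) := unescape_cpp_string_split r
      ([], p :: ps)
  | c :: r =>
      let (p, ps) := unescape_cpp_string_split r
      (c :: p, ps)

-- Source B's for-loop over iter(parts[1:]): a nonempty part is an escape char plus plain
-- text; an empty part is '\\\\', whose inner next(it) consumes the following part whole.
def unescape_cpp_string_alt_go : List (List Char) → List Char
  | [] => []
  | [] :: rest =>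
      match rest with
      | [] => ['\\']
      | nxt :: rest' => '\\' :: (nxt ++ unescape_cpp_string_alt_go rest')
  | (c :: cs) :: rest =>
      PySem.Dict.getD unescape_cpp_string_MAP c c :: (cs ++ unescape_cpp_string_alt_go rest)

def unescape_cpp_string_alt (text : String) : String :=
  let (p0, rest) := unescape_cpp_string_split text.toList
  String.mk (p0 ++ unescape_cpp_string_alt_go rest)

-- ===== PRECONDITION & SPEC =====
def Spec_unescape_cpp_string (text : String) (out : String) : Prop := out = unescape_cpp_string_alt text
instance (text : String) (out : String) : Decidable (Spec_unescape_cpp_string text out) := by unfold Spec_unescape_cpp_string; infer_instance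

-- ===== CLAIM (what is proved, stated in full; the proofs are below) =====
def Claim_equal_unescape_cpp_string : Prop := ∀ (text : String), Dom_unescape_cpp_string text → Spec_unescape_cpp_string text (unescape_cpp_string text)

-- ===== LEMMAS AND PROOFS =====

-- A's if/elif escape chain equals B's map lookup with default
lemma unescape_esc_eq (c : Char) :
    (if c = '"' then '"'
     else if c = 'n' then '\n'
     else if c = 't' then '\t'
     else if c = '\\' then '\\'
     else c) = PySem.Dict.getD unescape_cpp_string_MAP c c := by
  by_cases h2 : c = 'n' <;> by_cases h3 : c = 't' <;>
    simp_all [PySem.Dict.getD, unescape_cpp_string_MAP, PySem.Dict.ofList, PySem.Dict.get?,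
      PySem.Dict.update, PySem.Dict.insert, PySem.Dict.empty, List.find?, Ne.symm] <;>
  · rw [show ('t' == c) = false by simp [Ne.symm h3]]
    split_ifs <;> simp_all

lemma unescape_go_cons_ne (c : Char) (l : List Char) (h : ¬ c = '\\') :
    unescape_cpp_string_go (c :: l) = c :: unescape_cpp_string_go l := by
  cases l <;> simp [unescape_cpp_string_go, h]

-- joint invariant: reassembling the split of l gives A's result on l, and
-- processing the split of l as parts-after-a-backslash gives A's result on '\\'::l
lemma unescape_split_inv : ∀ (n : ℕ) (l : List Char), l.length ≤ n →
    ((unescape_cpp_string_split l).1 ++ unescape_cpp_string_alt_go (unescape_cpp_string_split l).2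
        = unescape_cpp_string_go l)
    ∧ (unescape_cpp_string_alt_go ((unescape_cpp_string_split l).1 :: (unescape_cpp_string_split l).2)
        = unescape_cpp_string_go ('\\' :: l)) := by
  intro n
  induction n with
  | zero =>
      intro l hl
      have : l = [] := List.length_eq_zero_iff.mp (Nat.le_zero.mp hl)
      subst this
      simp [unescape_cpp_string_split, unescape_cpp_string_alt_go, unescape_cpp_string_go]
  | succ n ih =>
      intro l hl
      cases l with
      | nil =>
          simp [unescape_cpp_string_split, unescape_cpp_string_alt_go, unescape_cpp_string_go]
      | cons c r =>
          have hr : r.length ≤ n := by simpa using Nat.lt_succ_iff.mp (by simpa using hl)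
          obtain ⟨ihm, iha⟩ := ih r hr
          by_cases hc : c = '\\'
          · subst hc
            constructor
            · simpa [unescape_cpp_string_split] using iha
            · -- split ('\\'::r) = ([], p :: ps); alt_go ([] :: p :: ps) = '\\' :: (p ++ alt_go ps)
              simp only [unescape_cpp_string_split, unescape_cpp_string_alt_go]
              rw [ihm]
              cases r with
              | nil => simp [unescape_cpp_string_split, unescape_cpp_string_go]
              | cons d r' => simp [unescape_cpp_string_go]
          · have hsplit : unescape_cpp_string_split (c :: r)
                = (c :: (unescape_cpp_string_split r).1, (unescape_cpp_string_split r).2) := by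
              cases hc' : c <;> simp_all [unescape_cpp_string_split]
            constructor
            · rw [hsplit, unescape_go_cons_ne c r hc]
              simpa using ihm
            · rw [hsplit]
              show unescape_cpp_string_alt_go ((c :: (unescape_cpp_string_split r).1) :: (unescape_cpp_string_split r).2)
                  = unescape_cpp_string_go ('\\' :: c :: r)
              simp only [unescape_cpp_string_alt_go, unescape_cpp_string_go]
              rw [ihm, unescape_esc_eq]

-- ===== VERDICT (by name: the statement is the Claim_ definition above) =====
theorem unescape_cpp_string_spec : Claim_equal_unescape_cpp_string := by
  intro text _
  unfold Spec_unescape_cpp_string unescape_cpp_string unescape_cpp_string_alt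
  have := (unescape_split_inv text.toList.length text.toList le_rfl).1
  simp only []
  rw [← this]
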